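-- pv_equiv track=rewrite | github.com/ryuki999/atcoder | ahc/ahc014/a6.py | contain_target_cor
-- ===== SOURCE A (Python) =====
-- def contain_target_cor(cor1, cor2, target_cor):
--     """斜め方向の座標間にある点がないか判定"""
--     x_step = 1
--     if cor1[0] > cor2[0]:
--         x_step = -1
--
--     y_step = 1
--     if cor1[1] > cor2[1]:
--         y_step = -1
--
--     bc = (cor1[0], cor1[1])
--     for _ in range(abs(cor1[1] - cor2[1])):
--         if cor1 != bc and cor2 != bc and bc == target_cor:
--             return True
--         bc = (bc[0]+ x_step, bc[1]+y_step)
--     return False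
-- ===== SOURCE B (Python) =====
-- def contain_target_cor(cor1, cor2, target_cor):
--     """O(1) arithmetic check: target sits strictly between cor1 and cor2 on the stepped diagonal."""
--     x_step = -1 if cor1[0] > cor2[0] else 1
--     y_step = -1 if cor1[1] > cor2[1] else 1
--     n = abs(cor1[1] - cor2[1])
--     k = (target_cor[1] - cor1[1]) * y_step
--     return (1 <= k <= n - 1
--             and target_cor[0] - cor1[0] == k * x_step
--             and target_cor != cor2)
-- ===== Notes on version B (the rewrite author's own statement) =====
-- stated objective: faster
-- what changed: Replaced the step-by-step walk along the diagonal with a closed-form arithmetic check: compute the step index k of the target from its y-offset and test the interior range and x-offset directly.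
import Mathlib
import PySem

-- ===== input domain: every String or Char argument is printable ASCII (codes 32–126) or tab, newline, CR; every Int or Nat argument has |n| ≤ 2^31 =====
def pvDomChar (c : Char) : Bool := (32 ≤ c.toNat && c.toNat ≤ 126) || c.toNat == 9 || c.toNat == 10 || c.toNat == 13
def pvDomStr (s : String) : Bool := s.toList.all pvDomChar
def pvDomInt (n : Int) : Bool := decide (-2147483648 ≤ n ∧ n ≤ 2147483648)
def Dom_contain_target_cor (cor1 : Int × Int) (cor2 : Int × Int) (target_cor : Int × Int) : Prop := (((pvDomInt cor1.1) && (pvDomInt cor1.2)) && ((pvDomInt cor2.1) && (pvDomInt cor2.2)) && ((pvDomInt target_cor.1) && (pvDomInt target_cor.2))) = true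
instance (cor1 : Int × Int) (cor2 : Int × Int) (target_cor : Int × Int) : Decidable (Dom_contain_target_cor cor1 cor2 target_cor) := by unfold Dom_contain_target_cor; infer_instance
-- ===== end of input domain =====

-- B replaces A's O(|dy|) step-by-step walk by an O(1) closed-form index/offset check (objective: faster).

-- ===== PORT A =====
-- the `for _ in range(...)` loop with early return, as structural recursion on the trip count
def containLoop (cor1 cor2 target_cor : Int × Int) (x_step y_step : Int) :
    Nat → (Int × Int) → Bool
  | 0, _ => false
  | n + 1, bc =>
    if cor1 ≠ bc ∧ cor2 ≠ bc ∧ bc = target_cor then true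
    else containLoop cor1 cor2 target_cor x_step y_step n (bc.1 + x_step, bc.2 + y_step)

def contain_target_cor (cor1 : Int × Int) (cor2 : Int × Int) (target_cor : Int × Int) : Bool :=
  let x_step : Int := if cor1.1 > cor2.1 then -1 else 1
  let y_step : Int := if cor1.2 > cor2.2 then -1 else 1
  containLoop cor1 cor2 target_cor x_step y_step (cor1.2 - cor2.2).natAbs (cor1.1, cor1.2)

-- ===== PORT B =====
def contain_target_cor_alt (cor1 : Int × Int) (cor2 : Int × Int) (target_cor : Int × Int) : Bool :=
  let x_step : Int := if cor1.1 > cor2.1 then -1 else 1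
  let y_step : Int := if cor1.2 > cor2.2 then -1 else 1
  let n : Int := ((cor1.2 - cor2.2).natAbs : Int)
  let k : Int := (target_cor.2 - cor1.2) * y_step
  decide (1 ≤ k ∧ k ≤ n - 1 ∧ target_cor.1 - cor1.1 = k * x_step ∧ target_cor ≠ cor2)

-- ===== PRECONDITION & SPEC =====
def Spec_contain_target_cor (cor1 : Int × Int) (cor2 : Int × Int) (target_cor : Int × Int) (out : Bool) : Prop := out = contain_target_cor_alt cor1 cor2 target_cor
instance (cor1 : Int × Int) (cor2 : Int × Int) (target_cor : Int × Int) (out : Bool) : Decidable (Spec_contain_target_cor cor1 cor2 target_cor out) := by unfold Spec_contain_target_cor; infer_instance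

-- ===== CLAIM (what is proved, stated in full; the proofs are below) =====
def Claim_equal_contain_target_cor : Prop := ∀ (cor1 : Int × Int) (cor2 : Int × Int) (target_cor : Int × Int), Dom_contain_target_cor cor1 cor2 target_cor → Spec_contain_target_cor cor1 cor2 target_cor (contain_target_cor cor1 cor2 target_cor)

-- ===== LEMMAS AND PROOFS =====

-- the loop returns true iff some visited point (bc shifted j times) is target and differs from both endpoints
theorem containLoop_iff (cor1 cor2 target_cor : Int × Int) (x_step y_step : Int)
    (n : Nat) (bc : Int × Int) :
    containLoop cor1 cor2 target_cor x_step y_step n bc = true ↔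
      ∃ j : Nat, j < n ∧
        bc.1 + j * x_step = target_cor.1 ∧ bc.2 + j * y_step = target_cor.2 ∧
        ¬(bc.1 + j * x_step = cor1.1 ∧ bc.2 + j * y_step = cor1.2) ∧
        ¬(bc.1 + j * x_step = cor2.1 ∧ bc.2 + j * y_step = cor2.2) := by
  induction n generalizing bc with
  | zero => simp [containLoop]
  | succ n ih =>
    rw [containLoop]
    split_ifs with h
    · obtain ⟨h1, h2, h3⟩ := h
      constructor
      · intro _
        refine ⟨0, Nat.succ_pos n, ?_, ?_, ?_, ?_⟩ <;>
          simp only [Nat.cast_zero, zero_mul, add_zero]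
        · exact congrArg Prod.fst h3
        · exact congrArg Prod.snd h3
        · rintro ⟨a, b⟩; exact h1 (Prod.ext_iff.mpr ⟨a.symm, b.symm⟩)
        · rintro ⟨a, b⟩; exact h2 (Prod.ext_iff.mpr ⟨a.symm, b.symm⟩)
      · intro _; rfl
    · rw [ih]
      constructor
      · rintro ⟨j, hj, e1, e2, g1, g2⟩
        dsimp only at e1 e2 g1 g2
        refine ⟨j + 1, by omega, ?_, ?_, ?_, ?_⟩ <;> push_cast
        · linear_combination e1
        · linear_combination e2
        · rintro ⟨a, b⟩; exact g1 ⟨by linear_combination a, by linear_combination b⟩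
        · rintro ⟨a, b⟩; exact g2 ⟨by linear_combination a, by linear_combination b⟩
      · rintro ⟨j, hj, e1, e2, g1, g2⟩
        match j with
        | 0 =>
          exfalso
          simp only [Nat.cast_zero, zero_mul, add_zero] at e1 e2 g1 g2
          apply h
          refine ⟨?_, ?_, Prod.ext_iff.mpr ⟨e1, e2⟩⟩
          · intro hc
            exact g1 ⟨(congrArg Prod.fst hc).symm, (congrArg Prod.snd hc).symm⟩
          · intro hc
            exact g2 ⟨(congrArg Prod.fst hc).symm, (congrArg Prod.snd hc).symm⟩
        | j + 1 =>
          push_cast at e1 e2 g1 g2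
          refine ⟨j, by omega, ?_, ?_, ?_, ?_⟩ <;> dsimp only
          · linear_combination e1
          · linear_combination e2
          · rintro ⟨a, b⟩; exact g1 ⟨by linear_combination a, by linear_combination b⟩
          · rintro ⟨a, b⟩; exact g2 ⟨by linear_combination a, by linear_combination b⟩

theorem contain_target_cor_eq (cor1 cor2 target_cor : Int × Int) :
    contain_target_cor cor1 cor2 target_cor = contain_target_cor_alt cor1 cor2 target_cor := by
  unfold contain_target_cor contain_target_cor_alt
  rw [Bool.eq_iff_iff, containLoop_iff]
  simp only [decide_eq_true_eq, Prod.ext_iff, ne_eq]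
  by_cases hx : cor1.1 > cor2.1 <;> by_cases hy : cor1.2 > cor2.2 <;>
      simp only [hx, hy, if_true, if_false, mul_one, mul_neg_one] <;>
      constructor
  -- eight directions, all linear arithmetic once the steps are the literals ±1
  all_goals
    first
      | (rintro ⟨j, hj, e1, e2, g1, g2⟩; omega)
      | (rintro ⟨hk1, hk2, hdx, hne⟩
         exact ⟨(target_cor.2 - cor1.2).natAbs, by omega⟩)

-- ===== VERDICT (by name: the statement is the Claim_ definition above) =====
theorem contain_target_cor_spec : Claim_equal_contain_target_cor := by
  intro cor1 cor2 target_cor _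
  exact contain_target_cor_eq cor1 cor2 target_cor
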